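-- pv_equiv track=rewrite | github.com/ryansmccoy/py-sec-edgar | py_sec_edgar/utilities.py | cleanLists_newlines
-- ===== SOURCE A (Python) =====
-- import unicodedata
--
-- def cleanLists_newlines(lista):
--     lista = ['\n'.join(' '.join(line.split()) for line in x.split('\n')) for x in lista]
--     lista = ["".join(x) for x in lista]
--     lista = [x.replace('\b', ' ') for x in lista]
--     lista = [x.replace('\n', '  ') for x in lista]
--     lista = [x.encode('utf8') for x in lista]
--     lista = [x.decode('utf8') for x in lista]
--     lista = [unicodedata.normalize("NFKD", l) for l in lista]
--     return lista
-- ===== SOURCE B (Python) =====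
-- import unicodedata
--
-- def cleanLists_newlines(lista):
--     # Single-pass character automaton per string instead of A's seven list passes:
--     # scan once with two state bits (has_word: current line saw a word char;
--     # pending: whitespace seen since the last emitted char of this line).
--     def clean(x):
--         out = []
--         has_word = False
--         pending = False
--         for c in x:
--             if c == '\n':
--                 out.append(' ')
--                 out.append(' ')
--                 has_word = False
--                 pending = False
--             elif c.isspace():
--                 pending = True
--             else:
--                 if pending and has_word:
--                     out.append(' ')
--                 out.append(c)
--                 has_word = True
--                 pending = False
--         return unicodedata.normalize('NFKD', ''.join(out))
--     return [clean(x) for x in lista]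
-- ===== Notes on version B (the rewrite author's own statement) =====
-- stated objective: faster
-- what changed: Replaces A's seven whole-list passes built on split/join and replace by a single-pass character automaton per string: one scan with two state bits (has_word, pending whitespace) that emits the collapsed text directly, never building intermediate lines, word lists or intermediate list copies.
import Mathlib
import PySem

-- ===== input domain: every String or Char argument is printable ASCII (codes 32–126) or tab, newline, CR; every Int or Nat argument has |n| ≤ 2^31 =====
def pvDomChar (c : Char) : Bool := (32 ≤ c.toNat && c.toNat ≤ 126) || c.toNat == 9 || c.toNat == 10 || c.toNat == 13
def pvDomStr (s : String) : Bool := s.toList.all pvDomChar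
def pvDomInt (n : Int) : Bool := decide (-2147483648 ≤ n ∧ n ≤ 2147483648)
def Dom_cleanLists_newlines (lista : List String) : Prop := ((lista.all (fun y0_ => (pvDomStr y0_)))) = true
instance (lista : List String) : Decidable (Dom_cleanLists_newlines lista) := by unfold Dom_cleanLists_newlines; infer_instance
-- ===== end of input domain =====

-- B replaces A's seven whole-list split/join/replace passes by a single-pass character
-- automaton per string (two state bits: has_word, pending whitespace): a different algorithm.


-- ===== PORT A =====
-- unicodedata.normalize("NFKD", s): exact on the stated domain (printable ASCII + tab/newline/CR),
-- where NFKD normalization is the identity.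
def pyNFKD (s : String) : String := s

def cleanLists_newlines (lista : List String) : List String :=
  -- lista = ['\n'.join(' '.join(line.split()) for line in x.split('\n')) for x in lista]
  let l1 := lista.map (fun x =>
    PySem.Str.join "\n" (((PySem.Str.split? x "\n").getD []).map
      (fun line => PySem.Str.join " " (PySem.Str.split₀ line))))
  -- lista = ["".join(x) for x in lista]
  let l2 := l1.map (fun x => PySem.Str.join "" (x.toList.map (fun c => String.ofList [c])))
  -- lista = [x.replace('\b', ' ') for x in lista]
  let l3 := l2.map (fun x => PySem.Str.replace x "\x08" " ")
  -- lista = [x.replace('\n', '  ') for x in lista]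
  let l4 := l3.map (fun x => PySem.Str.replace x "\n" "  ")
  -- encode('utf8') then decode('utf8'): exact as the identity on str (ports as two identity passes)
  let l5 := l4.map (fun x => x)
  let l6 := l5.map (fun x => x)
  -- lista = [unicodedata.normalize("NFKD", l) for l in lista]
  let l7 := l6.map (fun l => pyNFKD l)
  l7

-- ===== PORT B =====
-- unicodedata.normalize("NFKD", s): exact on the stated domain (identity on ASCII).
def pyNFKD_alt (s : String) : String := s

-- the for-loop of clean(x): state (out, has_word, pending), one character at a time
def cleanGoB : List Char → List Char → Bool → Bool → List Char
  | [], out, _, _ => out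
  | c :: rest, out, hw, pd =>
    if c = '\n' then cleanGoB rest (out ++ [' '] ++ [' ']) false false
    else if PySem.Chars.isspace c then cleanGoB rest out hw true
    else cleanGoB rest (out ++ (if pd && hw then [' '] else []) ++ [c]) true false

-- clean(x): run the automaton over x, ''.join(out), NFKD-normalize
def cleanOne_alt (x : String) : String :=
  pyNFKD_alt (String.ofList (cleanGoB x.toList [] false false))

def cleanLists_newlines_alt (lista : List String) : List String :=
  lista.map cleanOne_alt

-- ===== PRECONDITION & SPEC =====
def Spec_cleanLists_newlines (lista : List String) (out : List String) : Prop := out = cleanLists_newlines_alt lista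
instance (lista : List String) (out : List String) : Decidable (Spec_cleanLists_newlines lista out) := by unfold Spec_cleanLists_newlines; infer_instance

-- ===== CLAIM (what is proved, stated in full; the proofs are below) =====
def Claim_equal_cleanLists_newlines : Prop := ∀ (lista : List String), Dom_cleanLists_newlines lista → Spec_cleanLists_newlines lista (cleanLists_newlines lista)

-- ===== LEMMAS AND PROOFS =====

-- ---- common spec: collapse each '\n'-separated line's whitespace, join lines with two spaces ----
def collapseW (l : List Char) : List Char := PySem.Chars.join [' '] (PySem.Chars.split₀ l)
def specS (l : List Char) : List Char :=
  PySem.Chars.join [' ', ' '] ((PySem.Chars.splitOn l ['\n']).map collapseW)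

-- ---- accumulator-free models of PySem's split₀ / splitOn (single-char separator) ----
def myGo : List Char → List Char → List (List Char)
  | [], cur => if cur.isEmpty then [] else [cur.reverse]
  | c :: t, cur =>
    if PySem.Chars.isspace c then
      (if cur.isEmpty then myGo t [] else cur.reverse :: myGo t [])
    else myGo t (c :: cur)

def mySplit : List Char → List (List Char)
  | [] => [[]]
  | c :: t =>
    if c = '\n' then [] :: mySplit t
    else match mySplit t with
      | [] => [[c]]
      | fl :: rest => (c :: fl) :: rest

-- ---- accumulator-free model of B's automaton, and its closed form phiB ----
def FB : List Char → Bool → Bool → List Char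
  | [], _, _ => []
  | c :: t, hw, pd =>
    if c = '\n' then ' ' :: ' ' :: FB t false false
    else if PySem.Chars.isspace c then FB t hw true
    else (if pd && hw then [' '] else []) ++ c :: FB t true false

def leadB : List Char → Bool
  | [] => false
  | d :: _ => PySem.Chars.isspace d

def tailOutB (rest : List (List Char)) : List Char :=
  (rest.map (fun r => [' ', ' '] ++ collapseW r)).flatten

def phiB (l : List Char) (hw pd : Bool) : List Char :=
  match mySplit l with
  | [] => []
  | fl :: rest =>
    (if hw && (pd || leadB fl) && !(PySem.Chars.split₀ fl).isEmpty then [' '] else [])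
      ++ collapseW fl ++ tailOutB rest

-- ---- split₀ = myGo · [] ----
theorem go₀_eq : ∀ (l cur : List Char) (acc : List (List Char)),
    PySem.Chars.split₀.go l cur acc = acc.reverse ++ myGo l cur := by
  intro l
  induction l with
  | nil =>
    intro cur acc
    simp only [PySem.Chars.split₀.go, myGo]
    split <;> simp
  | cons c t ih =>
    intro cur acc
    simp only [PySem.Chars.split₀.go, myGo]
    by_cases hc : PySem.Chars.isspace c = true
    · simp only [hc, if_true]
      by_cases hcur : cur.isEmpty
      · simp [hcur, ih]
      · simp [hcur, ih]
    · simp only [hc, if_false, Bool.false_eq_true]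
      exact ih (c :: cur) acc

theorem split₀_eq_myGo (l : List Char) : PySem.Chars.split₀ l = myGo l [] := by
  unfold PySem.Chars.split₀
  simpa using go₀_eq l [] []

theorem myGo_ne_nil : ∀ (l cur : List Char), cur ≠ [] → myGo l cur ≠ [] := by
  intro l
  induction l with
  | nil => intro cur h; simp [myGo, h]
  | cons c t ih =>
    intro cur h
    simp only [myGo]
    by_cases hc : PySem.Chars.isspace c = true
    · simp [hc, List.isEmpty_iff, h]
    · simp only [hc, Bool.false_eq_true, if_false]
      exact ih (c :: cur) (by simp)

theorem myGo_snoc : ∀ (l cur : List Char) (c : Char), cur ≠ [] →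
    ∃ h r, myGo l cur = h :: r ∧ myGo l (cur ++ [c]) = (c :: h) :: r := by
  intro l
  induction l with
  | nil =>
    intro cur c h
    have hne : cur.isEmpty = false := by simpa [List.isEmpty_iff] using h
    refine ⟨cur.reverse, [], ?_, ?_⟩
    · simp [myGo, hne]
    · simp [myGo]
  | cons d t ih =>
    intro cur c h
    have hne : cur.isEmpty = false := by simpa [List.isEmpty_iff] using h
    by_cases hd : PySem.Chars.isspace d = true
    · refine ⟨cur.reverse, myGo t [], ?_, ?_⟩
      · simp [myGo, hd, hne]
      · simp [myGo, hd]
    · obtain ⟨w, r, h1, h2⟩ := ih (d :: cur) c (by simp)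
      refine ⟨w, r, ?_, ?_⟩
      · simp [myGo, hd, h1]
      · show myGo (d :: t) (cur ++ [c]) = _
        simp only [myGo, hd, Bool.false_eq_true, if_false]
        rw [show d :: (cur ++ [c]) = (d :: cur) ++ [c] from by simp, h2]

theorem split₀_ws_cons (c : Char) (t : List Char) (hc : PySem.Chars.isspace c = true) :
    PySem.Chars.split₀ (c :: t) = PySem.Chars.split₀ t := by
  simp [split₀_eq_myGo, myGo, hc]

theorem split₀_word_cons_nil (c : Char) (hc : PySem.Chars.isspace c = false) :
    PySem.Chars.split₀ [c] = [[c]] := by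
  simp [split₀_eq_myGo, myGo, hc]

theorem split₀_word_cons_ws (c d : Char) (t : List Char)
    (hc : PySem.Chars.isspace c = false) (hd : PySem.Chars.isspace d = true) :
    PySem.Chars.split₀ (c :: d :: t) = [c] :: PySem.Chars.split₀ t := by
  simp [split₀_eq_myGo, myGo, hc, hd]

theorem split₀_word_cons_word (c d : Char) (t : List Char)
    (hc : PySem.Chars.isspace c = false) (hd : PySem.Chars.isspace d = false) :
    ∃ h r, PySem.Chars.split₀ (d :: t) = h :: r ∧
      PySem.Chars.split₀ (c :: d :: t) = (c :: h) :: r := by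
  obtain ⟨h, r, h1, h2⟩ := myGo_snoc t [d] c (by simp)
  refine ⟨h, r, ?_, ?_⟩
  · simp [split₀_eq_myGo, myGo, hd, h1]
  · simpa [split₀_eq_myGo, myGo, hc, hd] using h2

theorem split₀_word_ne_nil (c : Char) (t : List Char) (hc : PySem.Chars.isspace c = false) :
    (PySem.Chars.split₀ (c :: t)).isEmpty = false := by
  rw [split₀_eq_myGo]
  simp only [myGo, hc, Bool.false_eq_true, if_false]
  have := myGo_ne_nil t [c] (by simp)
  simpa [List.isEmpty_iff] using this

-- ---- splitOn l ['\n'] = mySplit l ----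
theorem mySplit_ne_nil (l : List Char) : mySplit l ≠ [] := by
  cases l with
  | nil => simp [mySplit]
  | cons c t =>
    simp only [mySplit]
    split
    · simp
    · cases mySplit t <;> simp

def consHeadB (p : List Char) : List (List Char) → List (List Char)
  | [] => [p]
  | fl :: rest => (p ++ fl) :: rest

theorem goN_eq : ∀ (fuel : Nat) (l cur : List Char) (acc : List (List Char)),
    l.length ≤ fuel →
    PySem.Chars.splitOn.go ['\n'] fuel l cur acc
      = acc.reverse ++ consHeadB cur.reverse (mySplit l) := by
  intro fuel
  induction fuel with
  | zero =>
    intro l cur acc h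
    have : l = [] := by cases l <;> simp_all
    subst this
    simp [PySem.Chars.splitOn.go, mySplit, consHeadB]
  | succ n ih =>
    intro l cur acc h
    cases l with
    | nil => simp [PySem.Chars.splitOn.go, mySplit, consHeadB]
    | cons c t =>
      have ht : t.length ≤ n := by simp at h; omega
      by_cases hc : c = '\n'
      · subst hc
        have hpre : List.isPrefixOf ['\n'] ('\n' :: t) = true := by simp [List.isPrefixOf]
        simp only [PySem.Chars.splitOn.go, hpre, if_true]
        have hd : List.drop ['\n'].length ('\n' :: t) = t := rfl
        rw [hd, ih t [] (cur.reverse :: acc) ht]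
        cases hmt : mySplit t with
        | nil => exact absurd hmt (mySplit_ne_nil t)
        | cons fl rest => simp [mySplit, hmt, consHeadB]
      · have hpre : List.isPrefixOf ['\n'] (c :: t) = false := by
          simp [List.isPrefixOf]; exact fun hx => (hc hx.symm).elim
        simp only [PySem.Chars.splitOn.go, hpre, Bool.false_eq_true, if_false]
        rw [ih t (c :: cur) acc ht]
        cases hmt : mySplit t with
        | nil => exact absurd hmt (mySplit_ne_nil t)
        | cons fl rest => simp [mySplit, hmt, hc, consHeadB]

theorem splitOn_eq_mySplit (l : List Char) :
    PySem.Chars.splitOn l ['\n'] = mySplit l := by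
  unfold PySem.Chars.splitOn
  rw [goN_eq (l.length + 1) l [] [] (by omega)]
  cases hmt : mySplit l with
  | nil => exact absurd hmt (mySplit_ne_nil l)
  | cons fl rest => simp [consHeadB]

-- ---- the automaton's accumulator lemma and closed form ----
theorem cleanGoB_acc : ∀ (l out : List Char) (hw pd : Bool),
    cleanGoB l out hw pd = out ++ FB l hw pd := by
  intro l
  induction l with
  | nil => intro out hw pd; simp [cleanGoB, FB]
  | cons c t ih =>
    intro out hw pd
    simp only [cleanGoB, FB]
    by_cases hnl : c = '\n'
    · simp [hnl, ih]
    · by_cases hc : PySem.Chars.isspace c = true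
      · simp [hnl, hc, ih]
      · simp [hnl, hc, ih]

theorem intercalate_cons_cons (sep p q : List Char) (r : List (List Char)) :
    sep.intercalate (p :: q :: r) = p ++ sep ++ sep.intercalate (q :: r) := by
  simp [List.intercalate]

theorem join_eq_head_flatten (sep x : List Char) (xs : List (List Char)) :
    PySem.Chars.join sep (x :: xs) = x ++ (xs.map (fun y => sep ++ y)).flatten := by
  induction xs generalizing x with
  | nil => simp [PySem.Chars.join, List.intercalate]
  | cons q r ih =>
    show sep.intercalate (x :: q :: r) = _
    rw [intercalate_cons_cons]
    have := ih q
    simp only [PySem.Chars.join] at this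
    simp [this]

theorem collapseW_word_cons (c : Char) (hc : PySem.Chars.isspace c = false) (fl : List Char) :
    collapseW (c :: fl)
      = c :: ((if leadB fl && !(PySem.Chars.split₀ fl).isEmpty then [' '] else [])
          ++ collapseW fl) := by
  cases fl with
  | nil => simp [collapseW, split₀_word_cons_nil c hc, split₀_eq_myGo, myGo,
      PySem.Chars.join, List.intercalate, leadB]
  | cons d t =>
    by_cases hd : PySem.Chars.isspace d = true
    · rw [collapseW, split₀_word_cons_ws c d t hc hd]
      have hsplit : PySem.Chars.split₀ (d :: t) = PySem.Chars.split₀ t :=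
        split₀_ws_cons d t hd
      cases hst : PySem.Chars.split₀ t with
      | nil => simp [collapseW, hsplit, hst, leadB, hd, PySem.Chars.join, List.intercalate]
      | cons w r => simp [collapseW, hsplit, hst, leadB, hd, join_eq_head_flatten]
    · have hd' : PySem.Chars.isspace d = false := by simpa using hd
      obtain ⟨h, r, h1, h2⟩ := split₀_word_cons_word c d t hc hd'
      rw [collapseW, h2]
      simp [collapseW, h1, leadB, hd', join_eq_head_flatten]

theorem FB_eq_phiB : ∀ (l : List Char) (hw pd : Bool), FB l hw pd = phiB l hw pd := by
  intro l
  induction l with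
  | nil =>
    intro hw pd
    simp [FB, phiB, mySplit, collapseW, split₀_eq_myGo, myGo, tailOutB,
      PySem.Chars.join, List.intercalate]
  | cons c t ih =>
    intro hw pd
    cases hmt : mySplit t with
    | nil => exact absurd hmt (mySplit_ne_nil t)
    | cons fl rest =>
      by_cases hnl : c = '\n'
      · subst hnl
        simp only [FB, if_true, ih]
        simp [phiB, mySplit, hmt, tailOutB, collapseW, split₀_eq_myGo, myGo,
          PySem.Chars.join, List.intercalate]
      · by_cases hc : PySem.Chars.isspace c = true
        · simp only [FB, hnl, if_false, hc, if_true, ih]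
          have h1 : PySem.Chars.split₀ (c :: fl) = PySem.Chars.split₀ fl :=
            split₀_ws_cons c fl hc
          have h2 : collapseW (c :: fl) = collapseW fl := by
            simp [collapseW, h1]
          simp [phiB, mySplit, hmt, hnl, leadB, hc, h1, h2]
        · have hc' : PySem.Chars.isspace c = false := by simpa using hc
          simp only [FB, hnl, if_false, hc', Bool.false_eq_true, ih]
          have hne : (PySem.Chars.split₀ (c :: fl)).isEmpty = false :=
            split₀_word_ne_nil c fl hc'
          rw [phiB, phiB]
          simp only [mySplit, hnl, if_false, hmt]
          rw [collapseW_word_cons c hc' fl]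
          simp only [leadB, hc, Bool.or_false, Bool.false_or, Bool.true_and, hne,
            Bool.not_false, Bool.and_true]
          rw [Bool.and_comm pd hw]
          by_cases hcond : (hw && pd) = true
          · simp [hcond]
          · simp only [Bool.not_eq_true] at hcond
            simp [hcond]

theorem phiB_closed (l : List Char) : FB l false false = specS l := by
  rw [FB_eq_phiB]
  unfold phiB specS
  rw [splitOn_eq_mySplit]
  cases hmt : mySplit l with
  | nil => exact absurd hmt (mySplit_ne_nil l)
  | cons fl rest =>
    simp only [Bool.false_and, if_neg (by simp : ¬(false = true)),
      List.nil_append, List.map_cons]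
    rw [join_eq_head_flatten]
    simp [tailOutB, List.map_map, Function.comp_def]

-- ---- per-string equality, B side ----
theorem cleanOneB_eq (s : String) :
    cleanOne_alt s = String.ofList (specS s.toList) := by
  unfold cleanOne_alt pyNFKD_alt
  rw [cleanGoB_acc, List.nil_append, phiB_closed]

-- ---- A side: the '\b'/'\n' replacement pipeline at the character-list level ----
theorem replace_go_single (c : Char) (new : List Char) :
    ∀ (fuel : Nat) (l acc : List Char), l.length ≤ fuel →
      PySem.Chars.replace.go [c] new fuel l acc
        = acc.reverse ++ l.flatMap (fun x => if x = c then new else [x]) := by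
  intro fuel
  induction fuel with
  | zero =>
    intro l acc h
    have : l = [] := by cases l <;> simp_all
    subst this; simp [PySem.Chars.replace.go]
  | succ n ih =>
    intro l acc h
    cases l with
    | nil => simp [PySem.Chars.replace.go]
    | cons x t =>
      have h' : t.length ≤ n := by simp at h; omega
      by_cases hx : x = c
      · subst hx
        have hpre : List.isPrefixOf [x] (x :: t) = true := by simp [List.isPrefixOf]
        simp only [PySem.Chars.replace.go, hpre, if_true]
        have hd : List.drop [x].length (x :: t) = t := rfl
        rw [hd, ih t (new.reverse ++ acc) h']
        simp
      · have hpre : List.isPrefixOf [c] (x :: t) = false := by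
          simp [List.isPrefixOf]; exact fun hc => (hx hc.symm).elim
        simp only [PySem.Chars.replace.go, hpre, Bool.false_eq_true, if_false]
        rw [ih t (x :: acc) h']
        simp [hx]

theorem replace_single (c : Char) (new l : List Char) :
    PySem.Chars.replace l [c] new = l.flatMap (fun x => if x = c then new else [x]) := by
  unfold PySem.Chars.replace
  simp [replace_go_single c new l.length l [] (le_refl _)]

theorem flatMap_id_of_not_mem (c : Char) (new : List Char) :
    ∀ (l : List Char), c ∉ l → l.flatMap (fun x => if x = c then new else [x]) = l := by
  intro l hl
  induction l with
  | nil => rfl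
  | cons x t ih =>
    simp only [List.flatMap_cons]
    have hx : x ≠ c := fun h => hl (h ▸ List.mem_cons_self)
    rw [if_neg hx, ih (fun h => hl (List.mem_cons_of_mem _ h))]
    rfl

theorem flatMap_intercalate (f : Char → List Char) (sep : List Char) :
    ∀ (parts : List (List Char)),
      (sep.intercalate parts).flatMap f
        = (sep.flatMap f).intercalate (parts.map (fun p => p.flatMap f)) := by
  intro parts
  induction parts with
  | nil => simp [List.intercalate]
  | cons p rest ih =>
    cases rest with
    | nil => simp [List.intercalate]
    | cons q r =>
      rw [intercalate_cons_cons, List.flatMap_append, List.flatMap_append, ih]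
      simp [intercalate_cons_cons]

theorem mem_intercalate (c : Char) (sep : List Char) :
    ∀ (parts : List (List Char)), c ∈ sep.intercalate parts →
      c ∈ sep ∨ ∃ p ∈ parts, c ∈ p := by
  intro parts
  induction parts with
  | nil => simp [List.intercalate]
  | cons p rest ih =>
    cases rest with
    | nil => intro h; simp [List.intercalate] at h; exact Or.inr ⟨p, by simp, h⟩
    | cons q r =>
      intro h
      rw [intercalate_cons_cons, List.append_assoc] at h
      rcases List.mem_append.1 h with hp | h1
      · exact Or.inr ⟨p, by simp, hp⟩
      · rcases List.mem_append.1 h1 with hs | h2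
        · exact Or.inl hs
        · rcases ih h2 with hs | ⟨u, hu, hc⟩
          · exact Or.inl hs
          · exact Or.inr ⟨u, by simp_all, hc⟩

-- every character of every piece of split₀ satisfies Q, provided Q holds for the
-- non-whitespace characters of the input (and of the accumulators)
theorem split₀_go_forall (Q : Char → Prop) :
    ∀ (l cur : List Char) (acc : List (List Char)),
      (∀ c ∈ l, PySem.Chars.isspace c = false → Q c) →
      (∀ c ∈ cur, Q c) →
      (∀ p ∈ acc, ∀ c ∈ p, Q c) →
      ∀ p ∈ PySem.Chars.split₀.go l cur acc, ∀ c ∈ p, Q c := by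
  intro l
  induction l with
  | nil =>
    intro cur acc hl hcur hacc p hp
    simp only [PySem.Chars.split₀.go] at hp
    split at hp
    · intro c hc; exact hacc _ (by simpa using hp) c hc
    · rcases (by simpa using hp) with h | h
      · intro c hc; exact hacc _ h c hc
      · intro c hc; exact hcur c (by simpa [h] using hc)
  | cons x t ih =>
    intro cur acc hl hcur hacc p hp
    simp only [PySem.Chars.split₀.go] at hp
    split at hp
    · split at hp
      · exact ih [] acc (fun c hc hs => hl c (List.mem_cons_of_mem _ hc) hs) (by simp) hacc p hp
      · refine ih [] (cur.reverse :: acc) (fun c hc hs => hl c (List.mem_cons_of_mem _ hc) hs) (by simp) ?_ p hp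
        intro q hq c hc
        rcases List.mem_cons.1 hq with h | h
        · exact hcur c (by simpa [h] using hc)
        · exact hacc q h c hc
    · refine ih (x :: cur) acc (fun c hc hs => hl c (List.mem_cons_of_mem _ hc) hs) ?_ hacc p hp
      intro c hc
      rcases List.mem_cons.1 hc with h | h
      · subst h; exact hl c List.mem_cons_self (by simp_all)
      · exact hcur c h

theorem split₀_forall (Q : Char → Prop) (l : List Char)
    (hl : ∀ c ∈ l, PySem.Chars.isspace c = false → Q c) :
    ∀ p ∈ PySem.Chars.split₀ l, ∀ c ∈ p, Q c := by
  unfold PySem.Chars.split₀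
  exact split₀_go_forall Q l [] [] hl (by simp) (by simp)

-- every character of every piece of splitOn comes from the input
theorem splitOn_go_forall (sep : List Char) (Q : Char → Prop) :
    ∀ (fuel : Nat) (l cur : List Char) (acc : List (List Char)),
      (∀ c ∈ l, Q c) → (∀ c ∈ cur, Q c) → (∀ p ∈ acc, ∀ c ∈ p, Q c) →
      ∀ p ∈ PySem.Chars.splitOn.go sep fuel l cur acc, ∀ c ∈ p, Q c := by
  intro fuel
  induction fuel with
  | zero =>
    intro l cur acc hl hcur hacc p hp c hc
    simp only [PySem.Chars.splitOn.go] at hp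
    rcases (by simpa using hp) with h | h
    · exact hacc _ h c hc
    · rcases List.mem_append.1 (by simpa [h] using hc) with h1 | h1
      · exact hcur c (by simpa using h1)
      · exact hl c h1
  | succ n ih =>
    intro l cur acc hl hcur hacc p hp
    cases l with
    | nil =>
      simp only [PySem.Chars.splitOn.go] at hp
      rcases (by simpa using hp) with h | h
      · intro c hc; exact hacc _ h c hc
      · intro c hc; exact hcur c (by simpa [h] using hc)
    | cons x t =>
      simp only [PySem.Chars.splitOn.go] at hp
      split at hp
      · refine ih _ [] (cur.reverse :: acc)
          (fun c hc => hl c (List.mem_of_mem_drop hc)) (by simp) ?_ p hp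
        intro q hq c hc
        rcases List.mem_cons.1 hq with h | h
        · exact hcur c (by simpa [h] using hc)
        · exact hacc q h c hc
      · refine ih t (x :: cur) acc (fun c hc => hl c (List.mem_cons_of_mem _ hc)) ?_ hacc p hp
        intro c hc
        rcases List.mem_cons.1 hc with h | h
        · exact h ▸ hl x List.mem_cons_self
        · exact hcur c h

theorem splitOn_forall (sep : List Char) (Q : Char → Prop) (l : List Char)
    (hl : ∀ c ∈ l, Q c) :
    ∀ p ∈ PySem.Chars.splitOn l sep, ∀ c ∈ p, Q c := by
  unfold PySem.Chars.splitOn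
  exact splitOn_go_forall sep Q _ l [] [] hl (by simp) (by simp)

-- the '\b'/'\n' replacement pipeline at the character-list level
theorem chars_pipeline (parts : List (List Char))
    (hp : ∀ p ∈ parts, ∀ c ∈ p, c ≠ '\n' ∧ c ≠ '\x08') :
    PySem.Chars.replace (PySem.Chars.replace
        (PySem.Chars.join [] ((PySem.Chars.join ['\n'] parts).map (fun c => [c])))
        ['\x08'] [' ']) ['\n'] [' ', ' ']
      = PySem.Chars.join [' ', ' '] parts := by
  rw [PySem.Chars.join_nil_singletons]
  have hb : '\x08' ∉ PySem.Chars.join ['\n'] parts := by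
    intro h
    rcases mem_intercalate _ _ _ h with h1 | ⟨q, hq, hcq⟩
    · simp at h1
    · exact (hp q hq _ hcq).2 rfl
  rw [replace_single, replace_single, flatMap_id_of_not_mem _ _ _ hb]
  show (List.intercalate ['\n'] parts).flatMap _ = _
  rw [flatMap_intercalate]
  have h1 : (['\n'].flatMap (fun x => if x = '\n' then [' ', ' '] else [x])) = [' ', ' '] := by decide
  have h2 : parts.map (fun p => p.flatMap (fun x => if x = '\n' then [' ', ' '] else [x])) = parts := by
    have := List.map_congr_left (l := parts)
      (f := fun p => p.flatMap (fun x => if x = '\n' then [' ', ' '] else [x])) (g := fun p => p)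
      (fun p hpmem => flatMap_id_of_not_mem _ _ _ (fun hc => (hp p hpmem _ hc).1 rfl))
    simpa using this
  rw [h1, h2]
  rfl

-- per-string equality, A side
theorem cleanOneA_eq (s : String) (hs : pvDomStr s = true) :
    pyNFKD (PySem.Str.replace
      (PySem.Str.replace
        (PySem.Str.join "" ((PySem.Str.join "\n" (((PySem.Str.split? s "\n").getD []).map
          (fun line => PySem.Str.join " " (PySem.Str.split₀ line)))).toList.map
            (fun c => String.ofList [c])))
        "\x08" " ") "\n" "  ")
    = String.ofList (specS s.toList) := by
  have hdom : ∀ c ∈ s.toList, pvDomChar c = true := by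
    simpa [pvDomStr, List.all_eq_true] using hs
  have hpieceschar : ∀ p ∈ (PySem.Chars.splitOn s.toList ['\n']).map
      (fun line => PySem.Chars.join [' '] (PySem.Chars.split₀ line)), ∀ c ∈ p, c ≠ '\n' ∧ c ≠ '\x08' := by
    intro p hp c hc
    rcases List.mem_map.1 hp with ⟨line, hline, rfl⟩
    rcases mem_intercalate c [' '] _ hc with h | ⟨q, hq, hcq⟩
    · simp at h; subst h; constructor <;> decide
    · have hq' := split₀_forall
        (fun c => PySem.Chars.isspace c = false ∧ pvDomChar c = true) line
        (fun c hc hsps => ⟨hsps,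
          splitOn_forall ['\n'] (fun c => pvDomChar c = true) s.toList hdom line hline c hc⟩)
        q hq c hcq
      refine ⟨fun h => ?_, fun h => ?_⟩
      · rw [h] at hq'; exact absurd hq'.1 (by decide)
      · rw [h] at hq'; exact absurd hq'.2 (by decide)
  have hn : ("\n").toList = ['\n'] := by decide
  have hb : ("\x08").toList = ['\x08'] := by decide
  have hsp : (" ").toList = [' '] := by decide
  have hsp2 : ("  ").toList = [' ', ' '] := by decide
  have he : ("").toList = ([] : List Char) := by decide
  unfold pyNFKD specS collapseW
  simp only [PySem.Str.split?, PySem.Chars.split?, hn, List.isEmpty_cons,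
    Bool.false_eq_true, if_false, Option.map_some, Option.getD_some,
    PySem.Str.join, PySem.Str.split₀, PySem.Str.replace, List.map_map,
    Function.comp_def, String.toList_ofList, hb, hsp, hsp2, he, List.map_id']
  exact congrArg String.ofList (chars_pipeline _ hpieceschar)

-- ===== VERDICT (by name: the statement is the Claim_ definition above) =====
theorem cleanLists_newlines_spec : Claim_equal_cleanLists_newlines := by
  intro lista hdom
  unfold Spec_cleanLists_newlines cleanLists_newlines cleanLists_newlines_alt
  simp only [List.map_map]
  apply List.map_congr_left
  intro s hsmem
  have hs : pvDomStr s = true := by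
    have := (List.all_eq_true.1 hdom) s hsmem
    simpa using this
  have hA := cleanOneA_eq s hs
  have hB := cleanOneB_eq s
  simp only [Function.comp_def]
  rw [hA, hB]
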